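-- pv_equiv track=rewrite | github.com/subhamb123/WSU-Coding-Projects | CPTS 355/Python/Lab 3/Lab3.py | getMonthlyCases
-- ===== SOURCE A (Python) =====
-- def getMonthlyCases(data):
--      d = dict()
--      for(county, log) in data.items():
--           for(month, num) in log.items():
--                if month not in d:
--                     d[month] = {}
--                d[month][county] = num
--      return d
-- ===== SOURCE B (Python) =====
-- def getMonthlyCases(data):
--     months = dict.fromkeys(month for log in data.values() for month in log)
--     return {month: {county: log[month] for county, log in data.items() if month in log}
--             for month in months}
-- ===== Notes on version B (the rewrite author's own statement) =====
-- stated objective: idiomatic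
-- what changed: A builds the transposed dict in one incremental pass, creating/extending inner dicts entry by entry; B is a two-phase decomposition: it first gathers the ordered set of months with dict.fromkeys over a flattening generator, then builds the result as one dict comprehension that rescans the counties per month with an 'if month in log' guard. Pre_ only requires unique keys, the invariant every real Python dict argument satisfies (duplicate-keyed association lists represent no Python dict, and on them first-vs-last-match order is accidental).
import Mathlib
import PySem

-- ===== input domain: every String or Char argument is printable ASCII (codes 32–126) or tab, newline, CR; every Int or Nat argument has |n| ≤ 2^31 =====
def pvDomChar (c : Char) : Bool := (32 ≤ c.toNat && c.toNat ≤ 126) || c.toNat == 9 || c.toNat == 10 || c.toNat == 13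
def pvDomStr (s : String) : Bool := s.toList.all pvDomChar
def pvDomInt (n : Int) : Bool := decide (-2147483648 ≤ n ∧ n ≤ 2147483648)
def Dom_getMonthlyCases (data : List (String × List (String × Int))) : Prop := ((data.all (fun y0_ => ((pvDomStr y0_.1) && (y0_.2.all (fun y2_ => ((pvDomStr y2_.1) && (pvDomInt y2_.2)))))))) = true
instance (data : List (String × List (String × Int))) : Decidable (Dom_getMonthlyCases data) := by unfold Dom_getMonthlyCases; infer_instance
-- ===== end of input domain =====

-- B replaces A's single incremental insert-as-you-go pass by a two-phase decomposition
-- (gather the ordered month set first, then build each month's row by a fresh scan over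
-- the counties); objective: idiomatic, not faster.


-- ===== PORT A =====
def getMonthlyCases (data : List (String × List (String × Int))) : List (String × List (String × Int)) :=
  (data.foldl
    (fun (d : PySem.Dict String (PySem.Dict String Int)) cl =>
      cl.2.foldl
        (fun d mn =>
          -- if month not in d: d[month] = {}
          let d1 := if d.contains mn.1 = false then d.insert mn.1 PySem.Dict.empty else d
          -- d[month][county] = num  (month is present after the guard)
          d1.modify mn.1 PySem.Dict.empty (fun inner => inner.insert cl.1 mn.2))
        d)
    PySem.Dict.empty).items.map (fun p => (p.1, p.2.items))

-- ===== PORT B =====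
def getMonthlyCases_alt (data : List (String × List (String × Int))) : List (String × List (String × Int)) :=
  -- months = dict.fromkeys(month for log in data.values() for month in log)
  let months := PySem.List.dedup (data.flatMap (fun cl => cl.2.map Prod.fst))
  -- {month: {county: log[month] for county, log in data.items() if month in log} for month in months}
  months.map (fun m =>
    (m, (data.foldl
          (fun (acc : PySem.Dict String Int) cl =>
            match (PySem.Dict.mk cl.2).get? m with
            | some n => acc.insert cl.1 n
            | none => acc)
          PySem.Dict.empty).items))

-- ===== PRECONDITION & SPEC =====
-- Pre_ excludes association lists with a duplicated county key or a duplicated month key inside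
-- one county's log: such lists do not represent Python dicts (A's and B's arguments are dicts,
-- whose keys are necessarily unique), and on them first-vs-last-match behaviour is accidental.
def Pre_getMonthlyCases (data : List (String × List (String × Int))) : Prop :=
  (data.map Prod.fst).Nodup ∧ ∀ cl ∈ data, (cl.2.map Prod.fst).Nodup
instance (data : List (String × List (String × Int))) : Decidable (Pre_getMonthlyCases data) := by
  unfold Pre_getMonthlyCases; infer_instance

def pvWitness_getMonthlyCases : (List (String × List (String × Int))) :=
  [("Whitman", [("Jan", 5), ("Feb", 3)]), ("Spokane", [("Jan", 2)])]

def Spec_getMonthlyCases (data : List (String × List (String × Int))) (out : List (String × List (String × Int))) : Prop := out = getMonthlyCases_alt data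
instance (data : List (String × List (String × Int))) (out : List (String × List (String × Int))) : Decidable (Spec_getMonthlyCases data out) := by unfold Spec_getMonthlyCases; infer_instance

-- ===== CLAIM (what is proved, stated in full; the proofs are below) =====
def Claim_equal_getMonthlyCases : Prop := ∀ (data : List (String × List (String × Int))), Dom_getMonthlyCases data → Pre_getMonthlyCases data → Spec_getMonthlyCases data (getMonthlyCases data)

-- ===== LEMMAS AND PROOFS =====

-- the (county, month, num) triple view of the data, the per-month row both ports produce,
-- and the uniform step A's nested loop amounts to
def pvTri (data : List (String × List (String × Int))) : List (String × String × Int) :=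
  data.flatMap (fun cl => cl.2.map (fun mn => (cl.1, mn.1, mn.2)))

def pvRow (data : List (String × List (String × Int))) (m : String) : List (String × Int) :=
  data.filterMap (fun cl => ((PySem.Dict.mk cl.2).get? m).map (fun n => (cl.1, n)))

def pvStep1 (d : PySem.Dict String (PySem.Dict String Int)) (t : String × String × Int) :
    PySem.Dict String (PySem.Dict String Int) :=
  d.modify t.2.1 PySem.Dict.empty (fun inner => inner.insert t.1 t.2.2)

-- A's guarded body ('setdefault then write') is one modify
lemma stepA_eq (d : PySem.Dict String (PySem.Dict String Int)) (c : String) (mn : String × Int) :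
    (if d.contains mn.1 = false then d.insert mn.1 PySem.Dict.empty else d).modify mn.1
      PySem.Dict.empty (fun inner => inner.insert c mn.2) = pvStep1 d (c, mn.1, mn.2) := by
  cases h : d.contains mn.1 with
  | false =>
      simp [pvStep1, PySem.Dict.modify, PySem.Dict.getD_insert_self,
        PySem.Dict.insert_insert_self, PySem.Dict.getD_of_not_contains d PySem.Dict.empty h]
  | true => simp [h, pvStep1]

-- A's nested fold is the flat fold of pvStep1 over the triples
lemma foldA_eq (data : List (String × List (String × Int)))
    (d : PySem.Dict String (PySem.Dict String Int)) :
    data.foldl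
      (fun d cl =>
        cl.2.foldl
          (fun d mn =>
            let d1 := if d.contains mn.1 = false then d.insert mn.1 PySem.Dict.empty else d
            d1.modify mn.1 PySem.Dict.empty (fun inner => inner.insert cl.1 mn.2))
          d)
      d
      = (pvTri data).foldl pvStep1 d := by
  induction data generalizing d with
  | nil => rfl
  | cons cl rest ih =>
      simp only [pvTri, List.foldl_cons, List.flatMap_cons, List.foldl_append] at ih ⊢
      rw [ih]
      congr 1
      rw [List.foldl_map]
      simp only [stepA_eq]

lemma keysA (data : List (String × List (String × Int))) :
    ((pvTri data).foldl pvStep1 PySem.Dict.empty).keys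
      = PySem.List.dedup (data.flatMap (fun cl => cl.2.map Prod.fst)) := by
  have e : (pvTri data).foldl pvStep1 PySem.Dict.empty
      = (pvTri data).foldl
          (fun d t => d.modify t.2.1 PySem.Dict.empty
            ((fun (_ : PySem.Dict String (PySem.Dict String Int)) (t : String × String × Int) =>
              fun inner => inner.insert t.1 t.2.2) d t)) PySem.Dict.empty := rfl
  rw [e, PySem.Dict.keys_foldl_modify_key]
  have : (pvTri data).map (fun t => t.2.1) = data.flatMap (fun cl => cl.2.map Prod.fst) := by
    simp [pvTri, List.map_flatMap, Function.comp_def]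
  rw [this]
  simp [PySem.Set.update, PySem.List.dedup_eq_ofList, PySem.Set.ofList_eq_foldl]

lemma nodup_keysA (data : List (String × List (String × Int))) :
    ((pvTri data).foldl pvStep1 PySem.Dict.empty).keys.Nodup := by
  have e : (pvTri data).foldl pvStep1 PySem.Dict.empty
      = (pvTri data).foldl
          (fun d t => d.modify t.2.1 PySem.Dict.empty
            ((fun (_ : PySem.Dict String (PySem.Dict String Int)) (t : String × String × Int) =>
              fun inner => inner.insert t.1 t.2.2) d t)) PySem.Dict.empty := rfl
  rw [e]
  exact PySem.Dict.nodup_keys_foldl_modify_key _ _ _ _ _ (by simp)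

-- the inner dict A holds at month m is the fold over the month-m triples
lemma getD_foldA (l : List (String × String × Int)) (d : PySem.Dict String (PySem.Dict String Int))
    (m : String) :
    ((l.foldl pvStep1 d).getD m PySem.Dict.empty)
      = (l.filter (fun t => t.2.1 == m)).foldl (fun inn t => inn.insert t.1 t.2.2)
          (d.getD m PySem.Dict.empty) := by
  induction l generalizing d with
  | nil => rfl
  | cons a l ih =>
      simp only [List.foldl_cons, List.filter_cons, ih]
      by_cases hm : a.2.1 = m
      · simp [pvStep1, hm]
      · simp [pvStep1, PySem.Dict.getD_modify, hm, Ne.symm hm, beq_iff_eq]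

-- one county's month-m triples are its (unique) lookup at m
lemma tri_filter_county (c m : String) (l : List (String × Int))
    (h : (l.map Prod.fst).Nodup) :
    (l.map (fun mn => (c, mn.1, mn.2))).filter (fun t => t.2.1 == m)
      = (((PySem.Dict.mk l).get? m).map (fun n => (c, m, n))).toList := by
  induction l with
  | nil => rfl
  | cons a l ih =>
      obtain ⟨k, v⟩ := a
      simp only [List.map_cons, List.nodup_cons] at h
      by_cases hm : k = m
      · subst hm
        simp only [List.map_cons, List.filter_cons, PySem.Dict.get?_mk_cons, beq_self_eq_true,
          if_true, Option.map_some, Option.toList_some, List.cons.injEq, true_and]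
        rw [List.filter_eq_nil_iff]
        intro t ht
        simp only [List.mem_map] at ht
        obtain ⟨mn, hmn, rfl⟩ := ht
        simp only [beq_iff_eq]
        intro hc
        exact h.1 (hc ▸ List.mem_map_of_mem hmn)
      · simp only [List.map_cons, List.filter_cons, PySem.Dict.get?_mk_cons]
        rw [if_neg (by simp [hm]), if_neg (by simp [hm])]
        exact ih h.2

lemma tri_filter (data : List (String × List (String × Int)))
    (h : ∀ cl ∈ data, (cl.2.map Prod.fst).Nodup) (m : String) :
    (pvTri data).filter (fun t => t.2.1 == m)
      = data.filterMap (fun cl => ((PySem.Dict.mk cl.2).get? m).map (fun n => (cl.1, m, n))) := by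
  rw [pvTri, List.filter_flatMap, List.filterMap_eq_flatMap_toList]
  induction data with
  | nil => rfl
  | cons cl rest ih =>
      simp only [List.flatMap_cons]
      rw [tri_filter_county cl.1 m cl.2 (h cl (by simp)),
        ih (fun x hx => h x (List.mem_cons_of_mem _ hx))]

-- a row's first components form a sublist of the county list
lemma rowfst_sublist {α β κ : Type} (f : α → Option β) (key : α → κ) (data : List α) :
    ((data.filterMap (fun cl => (f cl).map (fun b => (key cl, b)))).map Prod.fst).Sublist
      (data.map key) := by
  induction data with
  | nil => simp
  | cons cl rest ih =>
      cases hf : f cl with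
      | none => simpa [List.filterMap_cons, hf] using ih.cons (key cl)
      | some b => simpa [List.filterMap_cons, hf] using ih.cons₂ (key cl)

-- B's comprehension fold is the fold over the row
lemma foldB_eq (m : String) (data : List (String × List (String × Int)))
    (acc : PySem.Dict String Int) :
    data.foldl
      (fun (acc : PySem.Dict String Int) cl =>
        match (PySem.Dict.mk cl.2).get? m with
        | some n => acc.insert cl.1 n
        | none => acc) acc
      = (pvRow data m).foldl (fun acc p => acc.insert p.1 p.2) acc := by
  induction data generalizing acc with
  | nil => rfl
  | cons cl rest ih =>
      cases hf : (PySem.Dict.mk cl.2).get? m with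
      | none => simp [pvRow, hf, ih]
      | some n => simp [pvRow, hf, ih]

lemma row_nodup_fst (data : List (String × List (String × Int)))
    (h1 : (data.map Prod.fst).Nodup) (m : String) :
    ((pvRow data m).map Prod.fst).Nodup :=
  (rowfst_sublist (fun cl => (PySem.Dict.mk cl.2).get? m) Prod.fst data).nodup h1

lemma row_items (data : List (String × List (String × Int)))
    (h1 : (data.map Prod.fst).Nodup) (m : String) :
    ((pvRow data m).foldl (fun acc p => acc.insert p.1 p.2) PySem.Dict.empty).items
      = pvRow data m := by
  have := PySem.Dict.items_foldl_insert_fresh (pvRow data m) Prod.fst Prod.snd PySem.Dict.empty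
    (by intro a _; simp) (row_nodup_fst data h1 m)
  simpa using this

lemma A_row (data : List (String × List (String × Int)))
    (h2 : ∀ cl ∈ data, (cl.2.map Prod.fst).Nodup) (m : String) :
    ((pvTri data).filter (fun t => t.2.1 == m)).map (fun t => (t.1, t.2.2)) = pvRow data m := by
  rw [tri_filter data h2 m]
  simp [pvRow, List.map_filterMap, Option.map_map, Function.comp_def]

lemma A_row_nodup (data : List (String × List (String × Int)))
    (h1 : (data.map Prod.fst).Nodup) (h2 : ∀ cl ∈ data, (cl.2.map Prod.fst).Nodup) (m : String) :
    (((pvTri data).filter (fun t => t.2.1 == m)).map Prod.fst).Nodup := by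
  rw [tri_filter data h2 m]
  have e : (fun (cl : String × List (String × Int)) =>
        ((PySem.Dict.mk cl.2).get? m).map (fun n => (cl.1, m, n)))
      = (fun cl => (((PySem.Dict.mk cl.2).get? m).map (fun n => (m, n))).map
          (fun b => (cl.1, b))) := by
    funext cl; simp [Option.map_map, Function.comp_def]
  rw [e]
  exact (rowfst_sublist (fun cl => ((PySem.Dict.mk cl.2).get? m).map (fun n => (m, n)))
    Prod.fst data).nodup h1

lemma main_eq (data : List (String × List (String × Int)))
    (h1 : (data.map Prod.fst).Nodup) (h2 : ∀ cl ∈ data, (cl.2.map Prod.fst).Nodup) :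
    getMonthlyCases data = getMonthlyCases_alt data := by
  unfold getMonthlyCases getMonthlyCases_alt
  rw [foldA_eq]
  rw [PySem.Dict.items_eq_map_keys _ (nodup_keysA data) PySem.Dict.empty]
  rw [keysA, List.map_map]
  apply List.map_congr_left
  intro m _
  simp only [Function.comp_apply]
  rw [foldB_eq, row_items data h1 m]
  congr 1
  rw [getD_foldA]
  rw [PySem.Dict.getD_empty]
  have := PySem.Dict.items_foldl_insert_fresh ((pvTri data).filter (fun t => t.2.1 == m))
    Prod.fst (fun t => t.2.2) PySem.Dict.empty (by intro a _; simp) (A_row_nodup data h1 h2 m)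
  rw [this]
  simpa using A_row data h2 m

-- ===== VERDICT (by name: the statement is the Claim_ definition above) =====
theorem getMonthlyCases_spec : Claim_equal_getMonthlyCases := by
  intro data _ hpre
  exact main_eq data hpre.1 hpre.2
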